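-- pv_equiv track=rewrite | github.com/Baniyal/Leetcode-2023 | Graphs/BFS & DFS/797_all_paths_from_source_to_target.py | function
-- ===== SOURCE A (Python) =====
-- from collections import defaultdict
--
-- def function(input_arr: list) -> int:
--     edges = input_arr
--     graph = defaultdict(list)
--     for vertex in range(len(edges)):
--         graph[vertex].extend(edges[vertex])
--     def dfs(source,destination,path,visited):
--         if source in visited:
--             return
--         visited.add(source)
--         if source == destination:
--             result.append(path + [destination])
--
--         for neighbour in graph[source]:
--             if neighbour not in visited:
--                 dfs(neighbour,destination,path + [source],visited)
--         visited.remove(source)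
--
--     result = []
--     dfs(0,len(edges)-1,[],set())
--     return result
-- ===== SOURCE B (Python) =====
-- def function(input_arr: list) -> int:
--     edges = input_arr
--     target = len(edges) - 1
--     result = []
--     stack = [[0]]
--     while stack:
--         path = stack.pop()
--         cur = path[-1]
--         if cur == target:
--             result.append(path)
--         neighbours = edges[cur] if 0 <= cur < len(edges) else []
--         for nb in reversed(neighbours):
--             if nb not in path:
--                 stack.append(path + [nb])
--     return result
-- ===== Notes on version B (the rewrite author's own statement) =====
-- stated objective: alternative
-- what changed: Replaces the recursive DFS with mutable visited-set, shared result list and a defaultdict adjacency rebuild by an iterative DFS over an explicit stack of partial paths (children pushed in reverse for identical order), indexing edges directly and using 'nb not in path' as the visited test.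
import Mathlib
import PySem

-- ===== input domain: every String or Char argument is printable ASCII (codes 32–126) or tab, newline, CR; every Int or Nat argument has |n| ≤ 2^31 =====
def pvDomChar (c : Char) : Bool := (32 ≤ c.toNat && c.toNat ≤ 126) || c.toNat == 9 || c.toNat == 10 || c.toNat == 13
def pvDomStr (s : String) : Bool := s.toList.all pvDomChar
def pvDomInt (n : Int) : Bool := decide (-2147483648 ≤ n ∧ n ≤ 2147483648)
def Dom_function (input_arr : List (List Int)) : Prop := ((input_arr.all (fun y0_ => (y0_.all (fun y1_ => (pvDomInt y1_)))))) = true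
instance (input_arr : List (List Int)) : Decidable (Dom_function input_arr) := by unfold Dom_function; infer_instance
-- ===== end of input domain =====

-- B replaces A's recursive DFS (mutable visited set, shared result, defaultdict graph) by an
-- iterative DFS over an explicit stack of partial paths; same return value, similar cost (alternative).

-- ===== PORT A =====
-- The adjacency structure A builds: graph = defaultdict(list); graph[v].extend(edges[v]) for v in range(len(edges)).
def pvGraph (edges : List (List Int)) : PySem.Dict Int (List Int) :=
  (PySem.List.pyRange 0 (edges.length : Int) 1).foldl
    (fun g v => g.modify v [] (fun l => l ++ PySem.List.pyGetD edges v [])) PySem.Dict.empty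

-- B-side adjacency: `edges[cur] if 0 <= cur < len(edges) else []` (also used to reason about pvGraph).
def pvNbrs (edges : List (List Int)) (cur : Int) : List Int :=
  if 0 ≤ cur ∧ cur < (edges.length : Int) then PySem.List.pyGetD edges cur [] else []

-- (termination helper) in-range vertices not occurring in a list
def pvFreeV (n : Nat) (vis : List Int) : Nat :=
  (PySem.List.pyRange 0 (n : Int) 1).countP (fun v => decide (v ∉ vis))

-- (termination helper) measure of a partial path: free vertices plus a flag for the tip being in range
def pvMu (edges : List (List Int)) (p : List Int) : Nat :=
  2 * (PySem.List.pyRange 0 (edges.length : Int) 1).countP (fun v => decide (v ∉ p)) +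
    (match p.getLast? with
     | some cur => if 0 ≤ cur ∧ cur < (edges.length : Int) then 1 else 0
     | none => 0)

-- (termination helper) strict countP comparison
theorem pv_countP_lt (l : List Int) (p q : Int → Bool) (h : ∀ a ∈ l, p a → q a)
    (x : Int) (hx : x ∈ l) (hq : q x) (hp : ¬ p x) : l.countP p < l.countP q := by
  induction l with
  | nil => simp at hx
  | cons a t ih =>
    have hle : t.countP p ≤ t.countP q :=
      List.countP_mono_left (fun a ha => h a (List.mem_cons_of_mem _ ha))
    rcases List.mem_cons.1 hx with rfl | hxt
    · simp only [List.countP_cons, hq, hp]; simp; omega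
    · have hc := ih (fun a ha => h a (List.mem_cons_of_mem _ ha)) hxt
      have h2 : (if p a then 1 else 0) ≤ (if q a then 1 else 0) := by
        by_cases hpa : p a
        · simp [hpa, h a List.mem_cons_self hpa]
        · simp [hpa]
      simp only [List.countP_cons]; omega

-- (termination helper) what the defaultdict lookup yields
theorem pvGraph_getD_aux (edges : List (List Int)) (m : Nat) (v : Int) :
    ((PySem.List.pyRange 0 (m : Int) 1).foldl
      (fun g v => g.modify v [] (fun l => l ++ PySem.List.pyGetD edges v [])) PySem.Dict.empty).getD v []
    = if 0 ≤ v ∧ v < (m : Int) then PySem.List.pyGetD edges v [] else [] := by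
  induction m with
  | zero =>
    rw [PySem.List.pyRange_one_eq_nil (by norm_num)]
    simp [PySem.Dict.getD_empty]
  | succ m ih =>
    have hsplit : PySem.List.pyRange 0 ((m + 1 : Nat) : Int) 1
        = PySem.List.pyRange 0 (m : Int) 1 ++ [(m : Int)] := by
      push_cast
      exact PySem.List.pyRange_one_succ_right (by positivity)
    rw [hsplit, List.foldl_append]
    simp only [List.foldl_cons, List.foldl_nil]
    rw [PySem.Dict.getD_modify]
    by_cases hv : v = (m : Int)
    · subst hv
      rw [ih]
      simp
    · simp only [hv, if_false]
      rw [ih]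
      have : (0 ≤ v ∧ v < (m : Int)) ↔ (0 ≤ v ∧ v < ((m + 1 : Nat) : Int)) := by
        push_cast; omega
      simp [this]

theorem pvGraph_getD (edges : List (List Int)) (v : Int) :
    (pvGraph edges).getD v [] = pvNbrs edges v := by
  rw [pvGraph, pvGraph_getD_aux, pvNbrs]


-- (termination helper) μ strictly drops when the path is extended by a fresh neighbour
theorem pvMu_append_lt (edges : List (List Int)) (p : List Int) (cur nb : Int)
    (hlast : p.getLast? = some cur) (hnb : nb ∈ pvNbrs edges cur) (hp : nb ∉ p) :
    pvMu edges (p ++ [nb]) < pvMu edges p := by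
  have hcur : 0 ≤ cur ∧ cur < (edges.length : Int) := by
    by_contra hc
    rw [pvNbrs, if_neg hc] at hnb
    simp at hnb
  have hmono : (PySem.List.pyRange 0 (edges.length : Int) 1).countP (fun v => decide (v ∉ p ++ [nb]))
      ≤ (PySem.List.pyRange 0 (edges.length : Int) 1).countP (fun v => decide (v ∉ p)) := by
    apply List.countP_mono_left
    intro a _ hpa
    simp only [decide_eq_true_eq, List.mem_append, List.mem_singleton] at *
    tauto
  unfold pvMu
  rw [hlast, List.getLast?_concat]
  dsimp only
  rw [if_pos hcur]
  by_cases hr : 0 ≤ nb ∧ nb < (edges.length : Int)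
  · have hlt : (PySem.List.pyRange 0 (edges.length : Int) 1).countP (fun v => decide (v ∉ p ++ [nb]))
        < (PySem.List.pyRange 0 (edges.length : Int) 1).countP (fun v => decide (v ∉ p)) := by
      apply pv_countP_lt _ _ _ ?_ nb
      · exact (PySem.List.mem_pyRange_one).2 hr
      · simp [hp]
      · simp
      · intro a _ hpa
        simp only [decide_eq_true_eq, List.mem_append, List.mem_singleton] at *
        tauto
    simp only [if_pos hr]
    omega
  · simp only [if_neg hr]
    omega

-- (termination helper) pvFreeV drops across a fresh in-range vertex, in the form the A-port needs
theorem pvFreeV_cons_lt (n : Nat) (vis : List Int) (nb : Int)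
    (hr : 0 ≤ nb ∧ nb < (n : Int)) (hnb : nb ∉ vis) :
    pvFreeV n (nb :: vis) < pvFreeV n vis := by
  apply pv_countP_lt _ _ _ ?_ nb
  · exact (PySem.List.mem_pyRange_one).2 hr
  · simp [hnb]
  · simp
  · intro a ha hpa
    simp only [decide_eq_true_eq, List.mem_cons] at *
    tauto

theorem pvFreeV_cons_le (n : Nat) (vis : List Int) (nb : Int) :
    pvFreeV n (nb :: vis) ≤ pvFreeV n vis := by
  apply List.countP_mono_left
  intro a ha hpa
  simp only [decide_eq_true_eq, List.mem_cons] at *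
  tauto

-- (termination helper) membership congruence for pvFreeV
theorem pvFreeV_congr (n : Nat) (v1 v2 : List Int) (h : ∀ x, x ∈ v1 ↔ x ∈ v2) :
    pvFreeV n v1 = pvFreeV n v2 := by
  unfold pvFreeV
  apply List.countP_congr
  intro a ha
  simp [h a]

mutual
-- def dfs(source, destination, path, visited) of A, with the loop over graph[source] as pvGoA;
-- visited is restored by A before returning, so it is not threaded back.
def pvDfsA (edges : List (List Int)) (dest : Int) (source : Int) (path : List Int)
    (visited : PySem.Set Int) (result : List (List Int)) : List (List Int) :=
  if PySem.Set.contains visited source = true then result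
  else
    let visited' := PySem.Set.add visited source
    let result' := if source = dest then result ++ [path ++ [dest]] else result
    pvGoA edges dest source path visited' ((pvGraph edges).getD source []) result'
termination_by
  (2 * pvFreeV edges.length (source :: visited) +
     (if 0 ≤ source ∧ source < (edges.length : Int) then 1 else 0),
   ((pvGraph edges).getD source []).length + 1)
decreasing_by
  have hFV : pvFreeV edges.length (PySem.Set.add visited source)
      = pvFreeV edges.length (source :: visited) := by
    apply pvFreeV_congr
    intro x
    rw [PySem.Set.mem_add]
    simp [or_comm]
  rw [hFV]
  by_cases hnil : (pvGraph edges).getD source [] = []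
  · by_cases hr : 0 ≤ source ∧ source < (edges.length : Int)
    · apply Prod.Lex.left
      simp [hnil, hr]
    · rw [hnil, if_pos rfl, if_neg hr]
      exact Prod.Lex.right _ (by simp [hnil])
  · have hr : 0 ≤ source ∧ source < (edges.length : Int) := by
      by_contra hc
      rw [pvGraph_getD, pvNbrs, if_neg hc] at hnil
      exact hnil rfl
    rw [if_neg hnil, if_pos hr]
    exact Prod.Lex.right _ (by omega)

def pvGoA (edges : List (List Int)) (dest : Int) (source : Int) (path : List Int)
    (visited' : PySem.Set Int) (nbrs : List Int) (result : List (List Int)) : List (List Int) :=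
  match nbrs with
  | [] => result
  | nb :: rest =>
    pvGoA edges dest source path visited' rest
      (if h : PySem.Set.contains visited' nb = true then result
       else pvDfsA edges dest nb (path ++ [source]) visited' result)
termination_by
  (2 * pvFreeV edges.length visited' + (if nbrs = [] then 0 else 1), nbrs.length)
decreasing_by
  · -- inner call pvDfsA nb (path ++ [source]) visited'
    have hnb : nb ∉ visited' := by
      intro hmem
      exact h (by simpa [PySem.Set.contains_eq_listContains, List.contains_iff_mem] using hmem)
    apply Prod.Lex.left
    by_cases hr : 0 ≤ nb ∧ nb < (edges.length : Int)
    · have h1 := pvFreeV_cons_lt edges.length visited' nb hr hnb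
      simp only [hr, and_self, if_true, if_false]
      simp
      omega
    · have h1 := pvFreeV_cons_le edges.length visited' nb
      simp [hr]
      omega
  · -- tail call on rest
    by_cases hrest : rest = []
    · apply Prod.Lex.left
      simp [hrest]
    · have h2 : (if False then (0:Nat) else 1) = 1 := by simp
      simp only [h2, hrest]
      exact Prod.Lex.right _ (by simp)
end

def function (input_arr : List (List Int)) : List (List Int) :=
  pvDfsA input_arr ((input_arr.length : Int) - 1) 0 [] PySem.Set.empty []

-- ===== PORT B =====
-- (termination helper) a row of edges is no longer than the flattened list
theorem pv_row_le_flatten (edges : List (List Int)) (i : Nat) :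
    (edges.getD i []).length ≤ edges.flatten.length := by
  induction edges generalizing i with
  | nil => simp
  | cons r t ih =>
    cases i with
    | zero => simp
    | succ j =>
      simp only [List.getD_cons_succ, List.flatten_cons, List.length_append]
      exact le_trans (ih j) (by omega)

-- (termination helper) the reversed push loop of B, as filter-map-prepend
theorem pvPush_foldl (path : List Int) (rest : List (List Int)) (l : List Int) :
    l.reverse.foldl (fun st nb => if nb ∈ path then st else (path ++ [nb]) :: st) rest =
      (l.filter (fun nb => decide (nb ∉ path))).map (fun nb => path ++ [nb]) ++ rest := by
  induction l with
  | nil => simp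
  | cons x xs ih =>
    simp only [List.reverse_cons, List.foldl_append, List.foldl_cons, List.foldl_nil, ih,
      List.filter_cons]
    by_cases hx : x ∈ path
    · simp [hx]
    · simp [hx]

-- (termination helper) sum bound
theorem pv_sum_le (l : List Nat) (c : Nat) (h : ∀ x ∈ l, x ≤ c) : l.sum ≤ l.length * c := by
  induction l with
  | nil => simp
  | cons a t ih =>
    simp only [List.sum_cons, List.length_cons]
    have h1 : a ≤ c := h a (by simp)
    have h2 : t.sum ≤ t.length * c := ih (fun x hx => h x (by simp [hx]))
    calc a + t.sum ≤ c + t.length * c := by omega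
      _ = (t.length + 1) * c := by ring

-- (termination helper) the stack potential drops at every iteration of B's loop
theorem pvStack_measure_lt (edges : List (List Int)) (path : List Int) (cur : Int)
    (hlast : path.getLast? = some cur) (rest : List (List Int)) :
    ((((pvNbrs edges cur).filter (fun nb => decide (nb ∉ path))).map (fun nb => path ++ [nb]) ++ rest).map
        (fun p => (edges.flatten.length + 2) ^ pvMu edges p)).sum <
      ((path :: rest).map (fun p => (edges.flatten.length + 2) ^ pvMu edges p)).sum := by
  set K := edges.flatten.length + 2 with hK
  set φ := fun p => K ^ pvMu edges p with hphi
  rw [List.map_append, List.sum_append, List.map_cons, List.sum_cons]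
  have hsuff : ((((pvNbrs edges cur).filter (fun nb => decide (nb ∉ path))).map
      (fun nb => path ++ [nb])).map φ).sum < φ path := by
    by_cases hn : (pvNbrs edges cur).filter (fun nb => decide (nb ∉ path)) = []
    · rw [hn]
      simp only [List.map_nil, List.sum_nil]
      positivity
    · have hne : pvNbrs edges cur ≠ [] := by
        intro hcontra
        rw [hcontra] at hn
        exact hn rfl
      have hr : 0 ≤ cur ∧ cur < (edges.length : Int) := by
        by_contra hc
        exact hne (by rw [pvNbrs, if_neg hc])
      have hmu1 : 1 ≤ pvMu edges path := by
        unfold pvMu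
        rw [hlast]
        dsimp only
        rw [if_pos hr]
        omega
      have hbound : ∀ x ∈ (((pvNbrs edges cur).filter (fun nb => decide (nb ∉ path))).map
          (fun nb => path ++ [nb])).map φ, x ≤ K ^ (pvMu edges path - 1) := by
        intro x hx
        simp only [List.mem_map, List.mem_filter, decide_eq_true_eq] at hx
        obtain ⟨q, ⟨nb, ⟨hnb, hnp⟩, rfl⟩, rfl⟩ := hx
        have hlt := pvMu_append_lt edges path cur nb hlast hnb hnp
        apply Nat.pow_le_pow_right (by omega)
        omega
      have hsum := pv_sum_le _ _ hbound
      have hlen : ((((pvNbrs edges cur).filter (fun nb => decide (nb ∉ path))).map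
          (fun nb => path ++ [nb])).map φ).length ≤ K - 2 := by
        simp only [List.length_map]
        have h1 : ((pvNbrs edges cur).filter (fun nb => decide (nb ∉ path))).length
            ≤ (pvNbrs edges cur).length := List.length_filter_le _ _
        have h2 : (pvNbrs edges cur).length ≤ edges.flatten.length := by
          rw [pvNbrs, if_pos hr]
          rw [PySem.List.pyGetD_of_nonneg edges [] hr.1]
          exact pv_row_le_flatten edges cur.toNat
        omega
      have hKpos : 0 < K ^ (pvMu edges path - 1) := by positivity
      calc ((((pvNbrs edges cur).filter (fun nb => decide (nb ∉ path))).map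
              (fun nb => path ++ [nb])).map φ).sum
          ≤ ((((pvNbrs edges cur).filter (fun nb => decide (nb ∉ path))).map
              (fun nb => path ++ [nb])).map φ).length * K ^ (pvMu edges path - 1) := hsum
        _ ≤ (K - 2) * K ^ (pvMu edges path - 1) := Nat.mul_le_mul_right _ hlen
        _ < K * K ^ (pvMu edges path - 1) := by
            exact (Nat.mul_lt_mul_right hKpos).2 (by omega)
        _ = K ^ (pvMu edges path - 1 + 1) := by rw [Nat.pow_succ]; ring
        _ = φ path := by rw [hphi]; congr 1; omega
  omega

-- the while-loop of B; the Lean list models the Python stack with its top at the head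
def pvLoopB (edges : List (List Int)) (target : Int) (stack : List (List Int))
    (result : List (List Int)) : List (List Int) :=
  match stack with
  | [] => result
  | path :: rest =>
    match h : PySem.List.pyGet? path (-1) with
    | none => pvLoopB edges target rest result   -- unreachable: every pushed path is nonempty
    | some cur =>
      let result' := if cur = target then result ++ [path] else result
      pvLoopB edges target
        ((pvNbrs edges cur).reverse.foldl
          (fun st nb => if nb ∈ path then st else (path ++ [nb]) :: st) rest)
        result'
termination_by (stack.map (fun p => (edges.flatten.length + 2) ^ pvMu edges p)).sum
decreasing_by
  · simp only [List.map_cons, List.sum_cons]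
    have h0 : 0 < (edges.flatten.length + 2) ^ pvMu edges path := by positivity
    omega
  · simp only [dite_eq_ite]
    rw [pvPush_foldl]
    rw [PySem.List.pyGet?_neg_one] at h
    exact pvStack_measure_lt edges path cur h rest

def function_alt (input_arr : List (List Int)) : List (List Int) :=
  pvLoopB input_arr ((input_arr.length : Int) - 1) [[0]] []

-- ===== PRECONDITION & SPEC =====
def Spec_function (input_arr : List (List Int)) (out : List (List Int)) : Prop := out = function_alt input_arr
instance (input_arr : List (List Int)) (out : List (List Int)) : Decidable (Spec_function input_arr out) := by unfold Spec_function; infer_instance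

-- ===== CLAIM (what is proved, stated in full; the proofs are below) =====
def Claim_equal_function : Prop := ∀ (input_arr : List (List Int)), Dom_function input_arr → Spec_function input_arr (function input_arr)

-- ===== LEMMAS AND PROOFS =====

-- the common reference: the list of paths the DFS emits from a given partial path
def pvE (edges : List (List Int)) (dest : Int) (p : List Int) : List (List Int) :=
  match hl : p.getLast? with
  | none => []
  | some cur =>
    (if cur = dest then [p] else []) ++
      (((pvNbrs edges cur).filter (fun nb => decide (nb ∉ p))).attach.flatMap
        (fun x => pvE edges dest (p ++ [x.1])))
termination_by pvMu edges p
decreasing_by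
  have hx := x.2
  simp only [List.mem_filter, decide_eq_true_eq] at hx
  exact pvMu_append_lt edges p cur x.1 hl hx.1 hx.2

theorem pv_flatMap_attach (l : List Int) (f : Int → List (List Int)) :
    l.attach.flatMap (fun x => f x.1) = l.flatMap f := by
  induction l with
  | nil => rfl
  | cons a t ih =>
    rw [List.attach_cons, List.flatMap_cons, List.flatMap_cons, List.flatMap_map]
    simp only [← ih]

theorem pvE_none (edges : List (List Int)) (dest : Int) (p : List Int)
    (hl : p.getLast? = none) : pvE edges dest p = [] := by
  rw [pvE, hl]

theorem pvE_some (edges : List (List Int)) (dest : Int) (p : List Int) (cur : Int)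
    (hl : p.getLast? = some cur) :
    pvE edges dest p = (if cur = dest then [p] else []) ++
      ((pvNbrs edges cur).filter (fun nb => decide (nb ∉ p))).flatMap
        (fun nb => pvE edges dest (p ++ [nb])) := by
  rw [pvE]
  split
  · next h => rw [hl] at h; cases h
  · next cur' h =>
    rw [hl] at h
    cases h
    rw [pv_flatMap_attach _ (fun nb => pvE edges dest (p ++ [nb]))]

theorem pvLoopB_nil (edges : List (List Int)) (target : Int) (acc : List (List Int)) :
    pvLoopB edges target [] acc = acc := by
  rw [pvLoopB]

theorem pvLoopB_cons (edges : List (List Int)) (target : Int) :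
    ∀ (N : Nat) (p : List Int), pvMu edges p < N → ∀ (S : List (List Int)) (acc : List (List Int)),
      pvLoopB edges target (p :: S) acc = pvLoopB edges target S (acc ++ pvE edges target p) := by
  intro N
  induction N with
  | zero => intro p hp; omega
  | succ N ih =>
    intro p hp S acc
    rw [pvLoopB]
    split
    · next hl =>
      rw [pvE_none edges target p (by rwa [PySem.List.pyGet?_neg_one] at hl)]
      simp
    · next cur hl =>
      have hlast : p.getLast? = some cur := by rwa [PySem.List.pyGet?_neg_one] at hl
      rw [pvPush_foldl]
      have inner : ∀ (l : List Int), (∀ nb ∈ l, pvMu edges (p ++ [nb]) < N) →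
          ∀ (S : List (List Int)) (acc : List (List Int)),
            pvLoopB edges target ((l.map (fun nb => p ++ [nb])) ++ S) acc
              = pvLoopB edges target S
                  (acc ++ l.flatMap (fun nb => pvE edges target (p ++ [nb]))) := by
        intro l
        induction l with
        | nil => intro _ S acc; simp
        | cons nb t iht =>
          intro hmu S acc
          simp only [List.map_cons, List.cons_append, List.flatMap_cons]
          rw [ih (p ++ [nb]) (hmu nb List.mem_cons_self) _ acc]
          rw [iht (fun q hq => hmu q (List.mem_cons_of_mem _ hq)) S _]
          rw [List.append_assoc]
      have hmus : ∀ nb ∈ (pvNbrs edges cur).filter (fun nb => decide (nb ∉ p)),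
          pvMu edges (p ++ [nb]) < N := by
        intro nb hnb
        simp only [List.mem_filter, decide_eq_true_eq] at hnb
        have := pvMu_append_lt edges p cur nb hlast hnb.1 hnb.2
        omega
      rw [inner _ hmus S _]
      rw [pvE_some edges target p cur hlast]
      by_cases hd : cur = target
      · simp [hd]
      · simp [hd]

theorem pvDfsA_eq (edges : List (List Int)) (dest : Int) :
    ∀ (N : Nat) (source : Int) (path : List Int) (visited : PySem.Set Int)
      (acc : List (List Int)),
      (∀ x : Int, x ∈ visited ↔ x ∈ path) → source ∉ path →
      pvMu edges (path ++ [source]) < N →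
      pvDfsA edges dest source path visited acc
        = acc ++ pvE edges dest (path ++ [source]) := by
  intro N
  induction N with
  | zero => intro _ _ _ _ _ _ h; omega
  | succ N ih =>
    intro source path visited acc hinv hsrc hmu
    rw [pvDfsA]
    have hguard : ¬ (PySem.Set.contains visited source = true) := by
      rw [PySem.Set.contains_iff]
      intro hmem
      exact hsrc ((hinv source).1 hmem)
    rw [if_neg hguard]
    have hinv' : ∀ x : Int, x ∈ PySem.Set.add visited source ↔ x ∈ path ++ [source] := by
      intro x
      rw [PySem.Set.mem_add, List.mem_append, List.mem_singleton, hinv]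
    rw [pvGraph_getD]
    have inner : ∀ (l : List Int), (∀ nb ∈ l, nb ∈ pvNbrs edges source) →
        ∀ (acc : List (List Int)),
          pvGoA edges dest source path (PySem.Set.add visited source) l acc
            = acc ++ (l.filter (fun nb => decide (nb ∉ path ++ [source]))).flatMap
                (fun nb => pvE edges dest ((path ++ [source]) ++ [nb])) := by
      intro l
      induction l with
      | nil => intro _ acc; rw [pvGoA]; simp
      | cons nb t iht =>
        intro hsub acc
        rw [pvGoA]
        by_cases hc : nb ∈ path ++ [source]
        · have : PySem.Set.contains (PySem.Set.add visited source) nb = true := by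
            rw [PySem.Set.contains_iff, hinv']
            exact hc
          rw [dif_pos this]
          rw [iht (fun q hq => hsub q (List.mem_cons_of_mem _ hq)) acc]
          have hfil : (nb :: t).filter (fun nb => decide (nb ∉ path ++ [source]))
              = t.filter (fun nb => decide (nb ∉ path ++ [source])) := by
            rw [List.filter_cons]
            simp [hc]
          rw [hfil]
        · have hcont : ¬ (PySem.Set.contains (PySem.Set.add visited source) nb = true) := by
            rw [PySem.Set.contains_iff, hinv']
            exact hc
          rw [dif_neg hcont]
          have hmu' : pvMu edges ((path ++ [source]) ++ [nb]) < N := by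
            have := pvMu_append_lt edges (path ++ [source]) source nb
              List.getLast?_concat (hsub nb List.mem_cons_self) hc
            omega
          rw [ih nb (path ++ [source]) (PySem.Set.add visited source) acc hinv' hc hmu']
          rw [iht (fun q hq => hsub q (List.mem_cons_of_mem _ hq)) _]
          have hfil : (nb :: t).filter (fun nb => decide (nb ∉ path ++ [source]))
              = nb :: t.filter (fun nb => decide (nb ∉ path ++ [source])) := by
            rw [List.filter_cons]
            simp [hc]
          rw [hfil, List.flatMap_cons, List.append_assoc]
    rw [inner _ (fun nb h => h) _]
    rw [pvE_some edges dest (path ++ [source]) source List.getLast?_concat]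
    by_cases hd : source = dest
    · subst hd
      simp
    · simp [hd]

-- ===== VERDICT (by name: the statement is the Claim_ definition above) =====
theorem function_spec : Claim_equal_function := by
  intro input_arr _
  unfold Spec_function function function_alt
  rw [pvDfsA_eq input_arr ((input_arr.length : Int) - 1)
      (pvMu input_arr ([] ++ [0]) + 1) 0 [] PySem.Set.empty []
      (by intro x; simp [PySem.Set.empty]) (by simp) (by omega)]
  rw [pvLoopB_cons input_arr ((input_arr.length : Int) - 1)
      (pvMu input_arr [0] + 1) [0] (by omega) [] []]
  rw [pvLoopB_nil]
  simp
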